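-- pv_equiv track=rewrite | github.com/dejia22/siamese-RPN | data_otb.py | _which
-- ===== SOURCE A (Python) =====
-- def _which(index, sum1):
--     """
--     从总体中选取index
--     看index是来自第几个文件夹
--     exp [0, 107, 879, 1084, 1472]
--     折半查找
--     low -- 0
--     high-- 4
--     """
--     length_sum = len(sum1)
--
--     low = 0
--
--     high = len(sum1) - 1
--     while(high - low > 1):
--         mid = (high+low) // 2
--         if sum1[mid] <= index:
--             low = mid
--         elif sum1[mid] > index:
--             high = mid
--     return low
-- ===== SOURCE B (Python) =====
-- def _which(index, sum1):
--     # State is (low, width) instead of (low, high): width is the size of the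
--     # current half-open gap and is halved each step; low + half is A's mid.
--     def go(low, width):
--         if width <= 1:
--             return low
--         half = width // 2
--         if sum1[low + half] <= index:
--             return go(low + half, width - half)
--         return go(low, half)
--     return go(0, len(sum1) - 1)
-- ===== Notes on version B (the rewrite author's own statement) =====
-- stated objective: alternative
-- what changed: A's iterative while-loop over mutable (low, high) bounds is replaced by a recursive helper over a different state (low, width): the gap width is halved each step and the probe index is low + width//2, so there is no high bound and no mid variable; the comparison sequence is identical.
import Mathlib
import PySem

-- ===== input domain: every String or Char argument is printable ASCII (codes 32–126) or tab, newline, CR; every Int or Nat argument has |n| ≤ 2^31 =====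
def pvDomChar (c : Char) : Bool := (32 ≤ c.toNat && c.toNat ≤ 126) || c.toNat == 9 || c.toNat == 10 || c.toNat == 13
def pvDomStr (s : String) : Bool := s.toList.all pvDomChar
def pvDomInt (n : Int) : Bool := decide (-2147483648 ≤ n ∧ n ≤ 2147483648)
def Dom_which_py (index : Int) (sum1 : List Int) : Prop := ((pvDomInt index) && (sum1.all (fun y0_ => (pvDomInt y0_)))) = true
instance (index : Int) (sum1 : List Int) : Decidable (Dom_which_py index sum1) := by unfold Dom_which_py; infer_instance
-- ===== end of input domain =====

-- B replaces A's iterative (low, high) binary search by a recursive helper over the state (low, width): the gap width is halved each step; alternative decomposition, not faster.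
-- ===== PORT A =====
-- the while loop of A: state (low, high), terminates because high - low strictly shrinks
def whichLoopA (index : Int) (sum1 : List Int) (low high : Int) : Int :=
  if _h : high - low > 1 then
    let mid := PySem.Int.floordiv (high + low) 2
    if (PySem.List.pyGet? sum1 mid).getD 0 <= index then whichLoopA index sum1 mid high
    else whichLoopA index sum1 low mid   -- elif sum1[mid] > index (exhaustive with the previous test)
  else low
termination_by (high - low).toNat
decreasing_by
  all_goals
    rw [PySem.Int.floordiv_eq_ediv_of_pos (a := high + low) (by omega)]
    omega

def which_py (index : Int) (sum1 : List Int) : Int :=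
  -- length_sum is unused in A; low = 0, high = len(sum1) - 1
  whichLoopA index sum1 0 ((sum1.length : Int) - 1)

-- ===== PORT B =====
-- B's recursive go(low, width); the width is a count of slots, ported as a Nat
-- (go is only ever called with width ≥ 0: len(sum1)-1 at the top is ≥ -1, and
-- Python's width = -1 and Lean's Nat 0 - 1 = 0 both hit the width ≤ 1 base case).
def whichGoB (index : Int) (sum1 : List Int) (low : Int) (width : Nat) : Int :=
  if width ≤ 1 then low
  else
    let half := width / 2
    if (PySem.List.pyGet? sum1 (low + (half : Int))).getD 0 ≤ index then
      whichGoB index sum1 (low + (half : Int)) (width - half)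
    else
      whichGoB index sum1 low half
termination_by width
decreasing_by all_goals omega

def which_py_alt (index : Int) (sum1 : List Int) : Int :=
  whichGoB index sum1 0 (sum1.length - 1)

-- ===== PRECONDITION & SPEC =====
def Spec_which_py (index : Int) (sum1 : List Int) (out : Int) : Prop := out = which_py_alt index sum1
instance (index : Int) (sum1 : List Int) (out : Int) : Decidable (Spec_which_py index sum1 out) := by unfold Spec_which_py; infer_instance

-- ===== CLAIM (what is proved, stated in full; the proofs are below) =====
def Claim_equal_which_py : Prop := ∀ (index : Int) (sum1 : List Int), Dom_which_py index sum1 → Spec_which_py index sum1 (which_py index sum1)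

-- ===== LEMMAS AND PROOFS =====
-- B's state (low, width) describes A's state (low, low + width)
theorem go_eq_loop (index : Int) (sum1 : List Int) (low : Int) (width : Nat) :
    whichGoB index sum1 low width = whichLoopA index sum1 low (low + (width : Int)) := by
  fun_induction whichGoB index sum1 low width with
  | case1 low width h =>
    rw [whichLoopA, dif_neg (by omega)]
  | case2 low width h half hle ih =>
    rw [whichLoopA, dif_pos (by omega)]
    have hm : PySem.Int.floordiv (low + (width : Int) + low) 2 = low + (half : Int) := by
      rw [PySem.Int.floordiv_eq_ediv_of_pos (by omega)]
      simp only [half]; omega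
    simp only [hm]
    rw [if_pos hle]
    rw [ih]
    congr 1
    simp only [half]; omega
  | case3 low width h half hle ih =>
    rw [whichLoopA, dif_pos (by omega)]
    have hm : PySem.Int.floordiv (low + (width : Int) + low) 2 = low + (half : Int) := by
      rw [PySem.Int.floordiv_eq_ediv_of_pos (by omega)]
      simp only [half]; omega
    simp only [hm]
    rw [if_neg hle]
    exact ih

-- ===== VERDICT (by name: the statement is the Claim_ definition above) =====
theorem which_py_spec : Claim_equal_which_py := by
  intro index sum1 _
  unfold Spec_which_py which_py which_py_alt
  rw [go_eq_loop]
  rcases sum1 with _ | ⟨a, t⟩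
  · rw [whichLoopA, dif_neg (by norm_num), whichLoopA, dif_neg (by norm_num)]
  · congr 1
    simp
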